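-- pv_equiv track=rewrite | github.com/chaselover/practiceAlgorithm | 13537 수열과쿼리1.py | infalte_tree
-- ===== SOURCE A (Python) =====
-- from math import ceil, log2
-- from math import log2, ceil
--
-- def infalte_tree(nodes):
--     height = ceil(log2(len(nodes)))
--     tree = [list() for _ in range(2 << height)]
--     end_layer = 1 << height
--
--     for seq, num in enumerate(nodes):
--         tree[end_layer + seq] = [num]
--
--     end_layer >>= 1
--     while end_layer:
--         for i in range(end_layer):
--             # 병합정렬
--             arr1_idx = arr2_idx = 0
--
--             while arr1_idx < len(tree[(end_layer + i) * 2]) and arr2_idx < len(tree[(end_layer + i) * 2 + 1]):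
--                 if tree[(end_layer + i) * 2][arr1_idx] < tree[(end_layer + i) * 2 + 1][arr2_idx]:
--                     tree[(end_layer + i)].append(tree[(end_layer + i) * 2][arr1_idx])
--                     arr1_idx += 1
--                 else:
--                     tree[(end_layer + i)].append(tree[(end_layer + i) * 2 + 1][arr2_idx])
--                     arr2_idx += 1
--
--             # 남은 원소 넣어주기
--             if arr1_idx != len(tree[(end_layer + i) * 2]):
--                 for e in range(arr1_idx, len(tree[(end_layer + i) * 2])):
--                     tree[(end_layer + i)].append(tree[(end_layer + i) * 2][e])
--
--             # 남은 원소 넣어주기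
--             if arr2_idx != len(tree[(end_layer + i) * 2 + 1]):
--                 for e in range(arr2_idx, len(tree[(end_layer + i) * 2 + 1])):
--                     tree[(end_layer + i)].append(tree[(end_layer + i) * 2 + 1][e])
--
--         end_layer >>= 1
--
--     return tree
-- ===== SOURCE B (Python) =====
-- from math import ceil, log2
--
--
-- def infalte_tree(nodes):
--     # Same merge-sort segment tree, built as a list of layers merged pairwise
--     # bottom-up and concatenated, instead of index arithmetic over one flat array.
--     height = ceil(log2(len(nodes)))
--     layer = [[num] for num in nodes]
--     layer += [[] for _ in range((1 << height) - len(nodes))]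
--     out = list(layer)
--     while len(layer) > 1:
--         layer = [_merge(layer[k], layer[k + 1]) for k in range(0, len(layer), 2)]
--         out = layer + out
--     return [[]] + out
--
--
-- def _merge(left, right):
--     # consume the two lists as stacks (reversed, pop from the end)
--     a = left[::-1]
--     b = right[::-1]
--     out = []
--     while a and b:
--         if a[-1] < b[-1]:
--             out.append(a.pop())
--         else:
--             out.append(b.pop())
--     out.extend(reversed(a))
--     out.extend(reversed(b))
--     return out
-- ===== Notes on version B (the rewrite author's own statement) =====
-- stated objective: alternative
-- what changed: B replaces A's in-place flat-array construction with index arithmetic (leaf placement plus a halving while-loop of index-based two-pointer merges with leftover range-copies over one mutable list) by building the tree as explicit layers: the leaf layer as a list of singletons, each upper layer produced by pairwise merging of adjacent lists, the heap array obtained by prepending each new layer; the merge itself consumes the two lists as reversed stacks (pop from the end) instead of maintaining two indices.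
import Mathlib
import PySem

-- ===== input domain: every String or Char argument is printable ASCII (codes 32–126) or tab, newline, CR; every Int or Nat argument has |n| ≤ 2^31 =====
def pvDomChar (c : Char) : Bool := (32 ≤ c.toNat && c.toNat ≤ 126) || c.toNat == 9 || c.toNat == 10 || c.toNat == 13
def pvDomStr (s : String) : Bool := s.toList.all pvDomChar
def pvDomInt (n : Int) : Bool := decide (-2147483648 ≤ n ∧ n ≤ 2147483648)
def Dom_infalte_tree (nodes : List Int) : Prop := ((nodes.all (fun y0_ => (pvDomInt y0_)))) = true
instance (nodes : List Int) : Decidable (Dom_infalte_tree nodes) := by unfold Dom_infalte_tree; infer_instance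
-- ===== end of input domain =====

-- B builds the same merge-sort segment tree as a list of layers (pairwise merges of
-- adjacent lists, each new layer prepended) instead of A's index arithmetic over one
-- flat array; same cost, different decomposition.

-- ===== PORT A =====
-- A's inner `while arr1_idx < len(..) and arr2_idx < len(..)` merge loop; returns
-- (accumulated output, arr1_idx, arr2_idx).  tree[..][idx] is read with the index in
-- range, ported as getD (the default is unreachable inside the guard).
def mergeAWhile (l r : List Int) (i j : Nat) (acc : List Int) : List Int × Nat × Nat :=
  if i < l.length ∧ j < r.length then
    if l.getD i 0 < r.getD j 0 then mergeAWhile l r (i + 1) j (acc ++ [l.getD i 0])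
    else mergeAWhile l r i (j + 1) (acc ++ [r.getD j 0])
  else (acc, i, j)
termination_by (l.length - i) + (r.length - j)
decreasing_by all_goals omega

-- the two leftover-copy loops (`for e in range(arr_idx, len(..)): append`)
def mergeAPost (l r : List Int) (res : List Int × Nat × Nat) : List Int :=
  let acc := res.1
  let i := res.2.1
  let j := res.2.2
  let acc := if i ≠ l.length then acc ++ (List.range' i (l.length - i)).map (fun e => l.getD e 0) else acc
  if j ≠ r.length then acc ++ (List.range' j (r.length - j)).map (fun e => r.getD e 0) else acc

-- the whole merge body of one iteration of A's `for i in range(end_layer)`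
def mergeA (l r : List Int) : List Int :=
  mergeAPost l r (mergeAWhile l r 0 0 [])

-- one pass `for i in range(end_layer)`: tree[end_layer+i] starts empty, so the
-- appends into it amount to setting it to the merge of its two children
def layerPass (t : List (List Int)) (e : Nat) : List (List Int) :=
  (List.range e).foldl
    (fun t i => t.set (e + i) (mergeA (t.getD ((e + i) * 2) []) (t.getD ((e + i) * 2 + 1) []))) t

-- `while end_layer: ... ; end_layer >>= 1`
def whileLayers (t : List (List Int)) (e : Nat) : List (List Int) :=
  if e = 0 then t else whileLayers (layerPass t e) (e >>> 1)
termination_by e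
decreasing_by simp only [Nat.shiftRight_one]; omega

-- `ceil(log2(len(nodes)))`: math.log2 is correctly rounded, so for every admitted
-- list length (1 ≤ n ≤ 2^31) the Python expression equals exactly ⌈log₂ n⌉ = Nat.clog 2 n.
def infalte_tree (nodes : List Int) : List (List Int) :=
  let height := Nat.clog 2 nodes.length
  let tree := List.replicate (2 <<< height) ([] : List Int)
  let endLayer := 1 <<< height
  let tree := (nodes.zipIdx).foldl (fun t p => t.set (endLayer + p.2) [p.1]) tree
  whileLayers tree (endLayer >>> 1)

-- ===== PORT B =====
-- B's `_merge` loop: `while a and b: out.append(a.pop() if a[-1] < b[-1] else b.pop())`,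
-- then `out.extend(reversed(a)); out.extend(reversed(b))` (a, b are stacks, top at the end)
def popMerge (out a b : List Int) : List Int :=
  if ha : a ≠ [] then
    if hb : b ≠ [] then
      if a.getLast ha < b.getLast hb then popMerge (out ++ [a.getLast ha]) a.dropLast b
      else popMerge (out ++ [b.getLast hb]) a b.dropLast
    else out ++ a.reverse ++ b.reverse
  else out ++ a.reverse ++ b.reverse
termination_by a.length + b.length
decreasing_by
  · have := List.length_pos_of_ne_nil ha; simp [List.length_dropLast]; omega
  · have := List.length_pos_of_ne_nil hb; simp [List.length_dropLast]; omega

-- B's `_merge`: `a = left[::-1]; b = right[::-1]`, then the stack loop above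
def mergeB (left right : List Int) : List Int := popMerge [] left.reverse right.reverse

-- `[_merge(layer[k], layer[k+1]) for k in range(0, len(layer), 2)]`; layer lengths
-- here are powers of two, so the odd-length case (Python: IndexError) is unreachable
-- and totalised to [].
def halveB : List (List Int) → List (List Int)
  | a :: b :: rest => mergeB a b :: halveB rest
  | _ => []

-- `while len(layer) > 1: layer = halve(layer); out = layer + out`; the fuel only
-- makes the loop total (layer.length iterations always suffice).
def collapseB (fuel : Nat) (layer out : List (List Int)) : List (List Int) :=
  match fuel with
  | 0 => out
  | f + 1 => if layer.length > 1 then collapseB f (halveB layer) (halveB layer ++ out) else out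

-- `ceil(log2(len(nodes)))` ported exactly as in A's port (same remark applies).
def infalte_tree_alt (nodes : List Int) : List (List Int) :=
  let height := Nat.clog 2 nodes.length
  let layer := nodes.map (fun num => [num]) ++ List.replicate ((1 <<< height) - nodes.length) []
  [] :: collapseB layer.length layer layer

-- ===== PRECONDITION & SPEC =====
-- Pre_ excludes only the empty list, on which Python A raises ValueError (log2 of 0).
def Pre_infalte_tree (nodes : List Int) : Prop := nodes ≠ []
instance (nodes : List Int) : Decidable (Pre_infalte_tree nodes) := by unfold Pre_infalte_tree; infer_instance
def pvWitness_infalte_tree : List Int := [3, 1, 2]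

def Spec_infalte_tree (nodes : List Int) (out : List (List Int)) : Prop := out = infalte_tree_alt nodes
instance (nodes : List Int) (out : List (List Int)) : Decidable (Spec_infalte_tree nodes out) := by unfold Spec_infalte_tree; infer_instance

-- ===== CLAIM (what is proved, stated in full; the proofs are below) =====
def Claim_equal_infalte_tree : Prop := ∀ (nodes : List Int), Dom_infalte_tree nodes → Pre_infalte_tree nodes → Spec_infalte_tree nodes (infalte_tree nodes)

-- ===== LEMMAS AND PROOFS =====

-- the layers stacked strictly above `layer`: its 1st, 2nd, … k-th pairwise-merge
-- halvings, topmost first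
def upperStack : Nat → List (List Int) → List (List Int)
  | 0, _ => []
  | k + 1, layer => upperStack k (halveB layer) ++ halveB layer

-- pairwise mergeA halving: the per-layer effect of A's inner for-loop
def halveA : List (List Int) → List (List Int)
  | a :: b :: rest => mergeA a b :: halveA rest
  | _ => []

-- head-first restatement of B's stack merge, the shape the A-side proofs use
def mergeLoop (out : List Int) : List Int → List Int → List Int
  | x :: xs, y :: ys =>
      if x < y then mergeLoop (out ++ [x]) xs (y :: ys)
      else mergeLoop (out ++ [y]) (x :: xs) ys
  | left, right => out ++ left ++ right
termination_by l r => l.length + r.length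
decreasing_by all_goals (simp; try omega)

theorem popMerge_eq (l : List Int) : ∀ (r out : List Int),
    popMerge out l.reverse r.reverse = mergeLoop out l r := by
  induction l with
  | nil =>
    intro r out
    rw [popMerge]
    cases r <;> simp [mergeLoop]
  | cons x xs ihl =>
    intro r
    induction r with
    | nil =>
      intro out
      rw [popMerge]
      simp [mergeLoop]
    | cons y ys ihr =>
      intro out
      rw [popMerge, dif_pos (by simp : (x :: xs).reverse ≠ []),
          dif_pos (by simp : (y :: ys).reverse ≠ [])]
      rw [List.getLast_reverse (by simp : (x :: xs).reverse ≠ []),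
          List.getLast_reverse (by simp : (y :: ys).reverse ≠ []),
          List.dropLast_reverse, List.dropLast_reverse]
      simp only [List.head_cons, List.tail_cons, mergeLoop]
      split_ifs with hxy
      · exact ihl (y :: ys) (out ++ [x])
      · exact ihr (out ++ [y])

theorem mergeLoop_acc (l r : List Int) : ∀ out, mergeLoop out l r = out ++ mergeLoop [] l r := by
  induction l generalizing r with
  | nil => intro out; cases r <;> simp [mergeLoop]
  | cons x xs ihl =>
    induction r with
    | nil => intro out; simp [mergeLoop]
    | cons y ys ihr =>
      intro out
      simp only [mergeLoop]
      split_ifs with hxy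
      · rw [ihl (y :: ys) (out ++ [x]), ihl (y :: ys) ([] ++ [x])]; simp
      · rw [ihr (out ++ [y]), ihr ([] ++ [y])]; simp

theorem rangeMap_drop (l : List Int) : ∀ (k i : Nat), l.length - i = k →
    (List.range' i k).map (fun e => l.getD e 0) = l.drop i := by
  intro k
  induction k with
  | zero =>
    intro i h
    simp [List.drop_eq_nil_iff]; omega
  | succ k ih =>
    intro i h
    have hi : i < l.length := by omega
    rw [List.range'_succ, List.map_cons, List.getD_eq_getElem l 0 hi,
        List.drop_eq_getElem_cons hi, ih (i + 1) (by omega)]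

theorem mergeAWhile_spec (l r : List Int) (i j : Nat) (acc : List Int)
    (hi : i ≤ l.length) (hj : j ≤ r.length) :
    mergeAPost l r (mergeAWhile l r i j acc) = acc ++ mergeLoop [] (l.drop i) (r.drop j) := by
  fun_induction mergeAWhile l r i j acc with
  | case1 i j acc h hxy ih =>
    rw [ih (by omega) hj, List.drop_eq_getElem_cons h.1, List.drop_eq_getElem_cons h.2]
    rw [List.getD_eq_getElem l 0 h.1] at hxy
    rw [List.getD_eq_getElem r 0 h.2] at hxy
    simp only [mergeLoop, if_pos hxy]
    rw [mergeLoop_acc _ _ ([] ++ [l[i]]), List.getD_eq_getElem l 0 h.1]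
    simp
  | case2 i j acc h hxy ih =>
    rw [ih hi (by omega), List.drop_eq_getElem_cons h.1, List.drop_eq_getElem_cons h.2]
    rw [List.getD_eq_getElem l 0 h.1] at hxy
    rw [List.getD_eq_getElem r 0 h.2] at hxy
    simp only [mergeLoop, if_neg hxy]
    rw [mergeLoop_acc _ _ ([] ++ [r[j]]), List.getD_eq_getElem r 0 h.2]
    simp
  | case3 i j acc h =>
    rcases Nat.lt_or_ge i l.length with hil | hil
    · have hjr : j = r.length := by omega
      subst hjr
      simp only [mergeAPost, if_pos (by omega : i ≠ l.length)]
      rw [rangeMap_drop l (l.length - i) i rfl]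
      have : l.drop i ≠ [] := by simp [List.drop_eq_nil_iff]; omega
      obtain ⟨x, xs, hx⟩ := List.exists_cons_of_ne_nil this
      simp [hx, mergeLoop]
    · have hil' : i = l.length := by omega
      subst hil'
      simp only [mergeAPost, if_neg (by omega : ¬ l.length ≠ l.length)]
      rcases Nat.eq_or_lt_of_le hj with hjr | hjr
      · simp [hjr, mergeLoop]
      · simp only [if_pos (by omega : j ≠ r.length)]
        rw [rangeMap_drop r (r.length - j) j rfl]
        simp [mergeLoop]

theorem mergeA_eq (l r : List Int) : mergeA l r = mergeB l r := by
  unfold mergeA mergeB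
  rw [mergeAWhile_spec l r 0 0 [] (by omega) (by omega), popMerge_eq l r []]
  simp

theorem halveA_eq (L : List (List Int)) : halveA L = halveB L := by
  fun_induction halveA L with
  | case1 a b rest ih => simp [halveB, ih, mergeA_eq]
  | case2 L h =>
    match L, h with
    | [], _ => rfl
    | [a], _ => rfl
    | a :: b :: u, h => exact absurd rfl (h a b u)

theorem halveB_length (L : List (List Int)) : (halveB L).length = L.length / 2 := by
  fun_induction halveB L with
  | case1 a b rest ih => simp [ih]; omega
  | case2 L h =>
    match L, h with
    | [], _ => rfl
    | [a], _ => simp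
    | a :: b :: u, h => exact absurd rfl (h a b u)

theorem set_at_len (C : List (List Int)) (x : List Int) (B : List (List Int)) (v : List Int) :
    (C ++ x :: B).set C.length v = C ++ v :: B := by simp

theorem getD_at (C B : List (List Int)) (k : Nat) (d : List Int) :
    (C ++ B).getD (C.length + k) d = B.getD k d := by
  simp [List.getD, List.getElem?_append_right]

theorem leafFold (E : Nat) : ∀ (ns : List Int) (k : Nat) (C : List (List Int)) (m : Nat),
    C.length = E + k →
    (ns.zipIdx k).foldl (fun t p => t.set (E + p.2) [p.1])
        (C ++ List.replicate (ns.length + m) []) =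
      C ++ ns.map (fun x => [x]) ++ List.replicate m [] := by
  intro ns
  induction ns with
  | nil => intro k C m hC; simp
  | cons x xs ih =>
    intro k C m hC
    rw [List.zipIdx_cons, List.foldl_cons]
    have h1 : xs.length + 1 + m = (xs.length + m) + 1 := by omega
    rw [show (x :: xs).length + m = (xs.length + m) + 1 by simp; omega, List.replicate_succ, ← hC,
        set_at_len]
    have h2 : C ++ [x] :: List.replicate (xs.length + m) ([] : List Int)
        = (C ++ [[x]]) ++ List.replicate (xs.length + m) [] := by simp
    rw [h2, ih (k + 1) (C ++ [[x]]) m (by simp [hC]; omega)]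
    simp

theorem passQ (e : Nat) : ∀ (rc s : Nat) (C D L2 rest : List (List Int)),
    C.length = e + s → D.length = 2 * s → L2.length = 2 * rc → e = s + rc →
    (List.range' s rc).foldl
        (fun t i => t.set (e + i) (mergeA (t.getD ((e + i) * 2) []) (t.getD ((e + i) * 2 + 1) [])))
        (C ++ List.replicate rc [] ++ D ++ L2 ++ rest)
      = C ++ halveA L2 ++ D ++ L2 ++ rest := by
  intro rc
  induction rc with
  | zero =>
    intro s C D L2 rest hC hD hL he
    have : L2 = [] := List.eq_nil_of_length_eq_zero (by omega)
    subst this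
    simp [halveA]
  | succ rc ih =>
    intro s C D L2 rest hC hD hL he
    match L2, hL with
    | a :: b :: tl, hL =>
      rw [List.range'_succ, List.foldl_cons]
      have hT : C ++ List.replicate (rc + 1) ([] : List Int) ++ D ++ (a :: b :: tl) ++ rest
          = (C ++ List.replicate (rc + 1) [] ++ D) ++ (a :: b :: (tl ++ rest)) := by
        simp
      have hF : (C ++ List.replicate (rc + 1) ([] : List Int) ++ D).length = (e + s) * 2 := by
        simp [hC, hD]; omega
      have hga : (C ++ List.replicate (rc + 1) ([] : List Int) ++ D ++ (a :: b :: tl) ++ rest).getD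
          ((e + s) * 2) [] = a := by
        rw [hT, ← hF, show (C ++ List.replicate (rc+1) ([]:List Int) ++ D).length
            = (C ++ List.replicate (rc+1) ([]:List Int) ++ D).length + 0 by omega,
          getD_at]
        rfl
      have hgb : (C ++ List.replicate (rc + 1) ([] : List Int) ++ D ++ (a :: b :: tl) ++ rest).getD
          ((e + s) * 2 + 1) [] = b := by
        rw [hT, ← hF, getD_at]
        rfl
      rw [hga, hgb]
      have hT2 : C ++ List.replicate (rc + 1) ([] : List Int) ++ D ++ (a :: b :: tl) ++ rest
          = C ++ ([] : List Int) :: (List.replicate rc [] ++ D ++ (a :: b :: tl) ++ rest) := by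
        rw [List.replicate_succ]; simp
      rw [hT2, show e + s = C.length from hC.symm, set_at_len]
      have h3 : C ++ mergeA a b :: (List.replicate rc ([] : List Int) ++ D ++ (a :: b :: tl) ++ rest)
          = (C ++ [mergeA a b]) ++ List.replicate rc [] ++ (D ++ [a, b]) ++ tl ++ rest := by
        simp
      rw [h3, ih (s + 1) (C ++ [mergeA a b]) (D ++ [a, b]) tl rest
            (by simp [hC]; omega) (by simp [hD]; omega)
            (by simp only [List.length_cons] at hL; omega) (by omega)]
      simp [halveA]

theorem layerPass_spec (e : Nat) (L rest : List (List Int)) (hL : L.length = 2 * e) :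
    layerPass (List.replicate (2 * e) [] ++ L ++ rest) e
      = List.replicate e [] ++ halveA L ++ L ++ rest := by
  unfold layerPass
  rw [List.range_eq_range']
  have h1 : List.replicate (2 * e) ([] : List Int) ++ L ++ rest
      = List.replicate e [] ++ List.replicate e [] ++ [] ++ L ++ rest := by
    rw [show 2 * e = e + e by omega, List.replicate_add]; simp
  rw [h1, passQ e e 0 (List.replicate e []) [] L rest (by simp) (by simp) hL (by omega)]
  simp

theorem whileLayers_spec : ∀ (j : Nat) (L rest : List (List Int)), L.length = 2 ^ (j + 1) →
    whileLayers (List.replicate (2 ^ (j + 1)) [] ++ L ++ rest) (2 ^ j)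
      = [] :: (upperStack (j + 1) L ++ (L ++ rest)) := by
  intro j
  induction j with
  | zero =>
    intro L rest hL
    rw [whileLayers, if_neg (by norm_num), show (2:Nat) ^ 0 = 1 from rfl,
        show (2:Nat) ^ (0 + 1) = 2 * 1 by norm_num, layerPass_spec 1 L rest (by simpa using hL)]
    rw [show (1:Nat) >>> 1 = 0 from rfl, whileLayers, if_pos rfl]
    simp [upperStack, halveA_eq]
  | succ j ih =>
    intro L rest hL
    rw [whileLayers, if_neg (by simp)]
    rw [show (2:Nat) ^ (j + 1 + 1) = 2 * 2 ^ (j + 1) by ring,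
        layerPass_spec (2 ^ (j + 1)) L rest (by rw [hL]; ring)]
    rw [show (2:Nat) ^ (j + 1) >>> 1 = 2 ^ j by
          rw [Nat.shiftRight_one, pow_succ, Nat.mul_div_cancel _ (by norm_num)]]
    rw [halveA_eq]
    have hhl : (halveB L).length = 2 ^ (j + 1) := by
      rw [halveB_length, hL, pow_succ 2 (j + 1), Nat.mul_div_cancel _ (by norm_num)]
    rw [show List.replicate (2 ^ (j + 1)) ([] : List Int) ++ halveB L ++ L ++ rest
          = List.replicate (2 ^ (j + 1)) [] ++ halveB L ++ (L ++ rest) by simp,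
        ih (halveB L) (L ++ rest) hhl]
    rw [show upperStack (j + 1 + 1) L = upperStack (j + 1) (halveB L) ++ halveB L from rfl]
    simp

theorem collapseB_spec : ∀ (k f : Nat) (layer out : List (List Int)),
    layer.length = 2 ^ k → k ≤ f → collapseB f layer out = upperStack k layer ++ out := by
  intro k
  induction k with
  | zero =>
    intro f layer out h hf
    cases f with
    | zero => simp [collapseB, upperStack]
    | succ f => simp [collapseB, h, upperStack]
  | succ k ih =>
    intro f layer out h hf
    cases f with
    | zero => omega
    | succ f =>
      rw [collapseB, if_pos (by rw [h]; exact Nat.one_lt_two_pow (by omega))]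
      rw [ih f (halveB layer) _ (by rw [halveB_length, h]; omega) (by omega)]
      rw [upperStack]
      simp

-- ===== VERDICT (by name: the statement is the Claim_ definition above) =====
theorem infalte_tree_spec : Claim_equal_infalte_tree := by
  intro nodes _dom hpre
  show infalte_tree nodes = infalte_tree_alt nodes
  have hn : 0 < nodes.length := List.length_pos_of_ne_nil hpre
  have hle := Nat.le_pow_clog (b := 2) (by norm_num) nodes.length
  simp only [infalte_tree, infalte_tree_alt, Nat.shiftLeft_eq, one_mul]
  generalize hgen : Nat.clog 2 nodes.length = h at hle ⊢
  have hrep : List.replicate (2 * 2 ^ h) ([] : List Int)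
      = List.replicate (2 ^ h) [] ++ List.replicate (nodes.length + (2 ^ h - nodes.length)) [] := by
    rw [← List.replicate_add]; congr 1; omega
  rw [hrep, leafFold (2 ^ h) nodes 0 (List.replicate (2 ^ h) []) (2 ^ h - nodes.length) (by simp)]
  have hlen : (nodes.map (fun num => [num]) ++ List.replicate (2 ^ h - nodes.length) ([] : List Int)).length
      = 2 ^ h := by simp; omega
  rw [collapseB_spec h _ _ _ hlen (by rw [hlen]; exact Nat.le_of_lt Nat.lt_two_pow_self)]
  cases h with
  | zero =>
    rw [show (2:Nat) ^ 0 >>> 1 = 0 from rfl, whileLayers, if_pos rfl]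
    simp [upperStack]
  | succ j =>
    rw [show (2:Nat) ^ (j + 1) >>> 1 = 2 ^ j by
          rw [Nat.shiftRight_one, pow_succ, Nat.mul_div_cancel _ (by norm_num)]]
    rw [show List.replicate (2 ^ (j + 1)) ([] : List Int) ++ nodes.map (fun x => [x])
            ++ List.replicate (2 ^ (j + 1) - nodes.length) []
          = List.replicate (2 ^ (j + 1)) []
            ++ (nodes.map (fun x => [x]) ++ List.replicate (2 ^ (j + 1) - nodes.length) []) ++ [] by
        simp,
      whileLayers_spec j _ [] (by simpa using hlen)]
    simp
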